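-- pv_equiv track=rewrite | github.com/Euan-J-Austin/Casino-Blackjack | main.py | unicode_output
-- ===== SOURCE A (Python) =====
-- def unicode_output(x):
--   output_hand = []
--   for s in x:
--     #CLUBS
--     if s == '1C':
--       output_hand.append('A\u2663')
--     elif s == '11C':
--       output_hand.append('J\u2663')
--     elif s == '12C':
--       output_hand.append('Q\u2663')
--     elif s == '13C':
--       output_hand.append('K\u2663')
--     elif s[-1] == 'C':
--       output_hand.append(f'{s[:-1]}\u2663')
--     #SPADES
--     if s == '1S':
--       output_hand.append('A\u2660')
--     elif s == '11S':
--       output_hand.append('J\u2660')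
--     elif s == '12S':
--       output_hand.append('Q\u2660')
--     elif s == '13S':
--       output_hand.append('K\u2660')
--     elif s[-1] == 'S':
--       output_hand.append(f'{s[:-1]}\u2660')
--     #DIAMONDS
--     if s == '1D':
--       output_hand.append('A\u2666')
--     elif s == '11D':
--       output_hand.append('J\u2666')
--     elif s == '12D':
--       output_hand.append('Q\u2666')
--     elif s == '13D':
--       output_hand.append('K\u2666')
--     elif s[-1] == 'D':
--       output_hand.append(f'{s[:-1]}\u2666')
--     #HEARTS
--     if s == '1H':
--       output_hand.append('A\u2665')
--     elif s == '11H':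
--       output_hand.append('J\u2665')
--     elif s == '12H':
--       output_hand.append('Q\u2665')
--     elif s == '13H':
--       output_hand.append('K\u2665')
--     elif s[-1] == 'H':
--       output_hand.append(f'{s[:-1]}\u2665')
--   if len(x) == len (output_hand):
--     return output_hand
-- ===== SOURCE B (Python) =====
-- # Staged-passes rewrite: instead of one accumulating loop of four 20-branch if-chains plus a
-- # final length comparison, B computes the rank translations and the suit lookups as separate
-- # whole-list passes, rejects the hand if any suit lookup failed, and zips the two columns.
--
-- SUITS = {'C': '\u2663', 'S': '\u2660', 'D': '\u2666', 'H': '\u2665'}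
-- FACE = {'1': 'A', '11': 'J', '12': 'Q', '13': 'K'}
--
-- def unicode_output(x):
--     ranks = [FACE.get(s[:-1], s[:-1]) for s in x]
--     suits = [SUITS.get(s[-1]) for s in x]
--     if None in suits:
--         return None
--     return [r + u for r, u in zip(ranks, suits)]
-- ===== Notes on version B (the rewrite author's own statement) =====
-- stated objective: alternative
-- what changed: Replaces A's single accumulating loop of four copy-pasted 20-branch if-chains plus a final length comparison with staged whole-list passes: one map translating ranks via a face table, one map looking up suit symbols, a global validity check (None in suits), then a zip joining the two columns.
import Mathlib
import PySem

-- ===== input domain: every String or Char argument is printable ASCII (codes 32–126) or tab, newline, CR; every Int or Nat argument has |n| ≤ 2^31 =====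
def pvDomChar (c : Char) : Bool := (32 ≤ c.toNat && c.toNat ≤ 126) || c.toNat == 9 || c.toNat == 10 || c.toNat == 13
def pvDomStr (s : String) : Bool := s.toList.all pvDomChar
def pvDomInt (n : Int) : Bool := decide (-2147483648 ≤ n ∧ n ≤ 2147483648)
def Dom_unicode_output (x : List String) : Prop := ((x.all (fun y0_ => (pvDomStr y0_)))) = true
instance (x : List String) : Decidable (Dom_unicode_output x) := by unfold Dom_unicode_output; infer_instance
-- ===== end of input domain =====

-- B replaces A's single accumulating loop of four 20-branch if-chains + final length comparison
-- with staged whole-list passes (rank map, suit map, global None check, zip) — objective: alternative.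

-- ===== PORT A =====
-- One loop body of A: the four sequential if-chains (clubs, spades, diamonds, hearts).
-- s[-1] is ported by PySem.Str.pyGet? s (-1) (none = IndexError on '', excluded by Pre_);
-- it is bound up front here, which is harmless since the Lean term is total.
def stepA (acc : List String) (s : String) : List String :=
  let last := PySem.Str.pyGet? s (-1)
  -- CLUBS
  let acc :=
    if s = "1C" then acc ++ ["A♣"]
    else if s = "11C" then acc ++ ["J♣"]
    else if s = "12C" then acc ++ ["Q♣"]
    else if s = "13C" then acc ++ ["K♣"]
    else if last = some 'C' then acc ++ [PySem.Str.slice s none (some (-1)) ++ "♣"]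
    else acc
  -- SPADES
  let acc :=
    if s = "1S" then acc ++ ["A♠"]
    else if s = "11S" then acc ++ ["J♠"]
    else if s = "12S" then acc ++ ["Q♠"]
    else if s = "13S" then acc ++ ["K♠"]
    else if last = some 'S' then acc ++ [PySem.Str.slice s none (some (-1)) ++ "♠"]
    else acc
  -- DIAMONDS
  let acc :=
    if s = "1D" then acc ++ ["A♦"]
    else if s = "11D" then acc ++ ["J♦"]
    else if s = "12D" then acc ++ ["Q♦"]
    else if s = "13D" then acc ++ ["K♦"]
    else if last = some 'D' then acc ++ [PySem.Str.slice s none (some (-1)) ++ "♦"]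
    else acc
  -- HEARTS
  if s = "1H" then acc ++ ["A♥"]
  else if s = "11H" then acc ++ ["J♥"]
  else if s = "12H" then acc ++ ["Q♥"]
  else if s = "13H" then acc ++ ["K♥"]
  else if last = some 'H' then acc ++ [PySem.Str.slice s none (some (-1)) ++ "♥"]
  else acc

def unicode_output (x : List String) : Option (List String) :=
  let output_hand := x.foldl stepA []
  if x.length = output_hand.length then some output_hand else none

-- ===== PORT B =====
def suitsB : PySem.Dict Char String :=
  PySem.Dict.ofList [('C', "♣"), ('S', "♠"), ('D', "♦"), ('H', "♥")]

def faceB : PySem.Dict String String :=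
  PySem.Dict.ofList [("1", "A"), ("11", "J"), ("12", "Q"), ("13", "K")]

-- Source B pass 1's element: FACE.get(s[:-1], s[:-1])
def rankOf (s : String) : String :=
  let r := PySem.Str.slice s none (some (-1))
  PySem.Dict.getD faceB r r

-- Source B pass 2's element: SUITS.get(s[-1]); s[-1] on '' raises IndexError (excluded by Pre_),
-- ported as none here
def suitOf (s : String) : Option String :=
  match PySem.Str.pyGet? s (-1) with
  | none => none
  | some c => PySem.Dict.get? suitsB c

def unicode_output_alt (x : List String) : Option (List String) :=
  let ranks := x.map rankOf
  let suits := x.map suitOf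
  if none ∈ suits then none
  else some ((ranks.zip suits).map fun p => p.1 ++ p.2.getD "")
  -- .getD "" only extracts the value under some: the guard ensures no none is in suits

-- ===== PRECONDITION & SPEC =====
-- Pre_ excludes lists containing the empty string, on which A raises IndexError at s[-1].
def Pre_unicode_output (x : List String) : Prop := "" ∉ x
instance (x : List String) : Decidable (Pre_unicode_output x) := by
  unfold Pre_unicode_output; infer_instance

def pvWitness_unicode_output : List String := ["1C", "10H"]

def Spec_unicode_output (x : List String) (out : Option (List String)) : Prop :=
  out = unicode_output_alt x
instance (x : List String) (out : Option (List String)) : Decidable (Spec_unicode_output x out) := by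
  unfold Spec_unicode_output; infer_instance

-- ===== CLAIM =====
def Claim_equal_unicode_output : Prop :=
  ∀ (x : List String), Dom_unicode_output x → Pre_unicode_output x →
    Spec_unicode_output x (unicode_output x)

-- ===== LEMMAS AND PROOFS =====

-- proof-side bridge: what one card contributes, shared shape of both sides
def convH (s : String) : Option String := (suitOf s).map fun u => rankOf s ++ u

-- the rank s[:-1] of a string ending in c is its init
lemma rank_toList {s : String} {init : List Char} {c : Char} (hl : s.toList = init ++ [c]) :
    (PySem.Str.slice s none (some (-1))).toList = init := by
  rw [PySem.Str.slice_to_neg_one, hl]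
  simp

-- the rank differs from a literal unless the whole string is the literal rank+suit
lemma rank_ne {s : String} {init : List Char} {c : Char} (hl : s.toList = init ++ [c])
    {t u : String} (htu : u.toList = t.toList ++ [c]) (hs : s ≠ u) :
    PySem.Str.slice s none (some (-1)) ≠ t := by
  intro h
  apply hs
  apply String.toList_inj.mp
  rw [hl, htu, ← rank_toList hl, h]

-- per-card agreement: one run of A's four chains appends exactly what convH yields
lemma stepA_conv (acc : List String) (s : String) :
    stepA acc s = acc ++ (convH s).toList := by
  rcases List.eq_nil_or_concat s.toList with hl | ⟨init, c, hl⟩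
  · have hs : s = "" := String.toList_inj.mp (by simpa using hl)
    subst hs
    simp [stepA, (show convH "" = none from by decide),
      (show PySem.List.pyGet? ([] : List Char) (-1) = (none : Option Char) from by decide)]
  · rw [List.concat_eq_append] at hl
    have hget : PySem.List.pyGet? s.toList (-1) = some c := by
      rw [hl, PySem.List.pyGet?_neg_one]
      simp
    by_cases h1C : s = "1C"
    · subst h1C
      simp [stepA, (show convH "1C" = some "A♣" from by decide),
        (show PySem.List.pyGet? ['1', 'C'] (-1) = some 'C' from by decide)]
    by_cases h11C : s = "11C"
    · subst h11C
      simp [stepA, (show convH "11C" = some "J♣" from by decide),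
        (show PySem.List.pyGet? ['1', '1', 'C'] (-1) = some 'C' from by decide)]
    by_cases h12C : s = "12C"
    · subst h12C
      simp [stepA, (show convH "12C" = some "Q♣" from by decide),
        (show PySem.List.pyGet? ['1', '2', 'C'] (-1) = some 'C' from by decide)]
    by_cases h13C : s = "13C"
    · subst h13C
      simp [stepA, (show convH "13C" = some "K♣" from by decide),
        (show PySem.List.pyGet? ['1', '3', 'C'] (-1) = some 'C' from by decide)]
    by_cases h1S : s = "1S"
    · subst h1S
      simp [stepA, (show convH "1S" = some "A♠" from by decide),
        (show PySem.List.pyGet? ['1', 'S'] (-1) = some 'S' from by decide)]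
    by_cases h11S : s = "11S"
    · subst h11S
      simp [stepA, (show convH "11S" = some "J♠" from by decide),
        (show PySem.List.pyGet? ['1', '1', 'S'] (-1) = some 'S' from by decide)]
    by_cases h12S : s = "12S"
    · subst h12S
      simp [stepA, (show convH "12S" = some "Q♠" from by decide),
        (show PySem.List.pyGet? ['1', '2', 'S'] (-1) = some 'S' from by decide)]
    by_cases h13S : s = "13S"
    · subst h13S
      simp [stepA, (show convH "13S" = some "K♠" from by decide),
        (show PySem.List.pyGet? ['1', '3', 'S'] (-1) = some 'S' from by decide)]
    by_cases h1D : s = "1D"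
    · subst h1D
      simp [stepA, (show convH "1D" = some "A♦" from by decide),
        (show PySem.List.pyGet? ['1', 'D'] (-1) = some 'D' from by decide)]
    by_cases h11D : s = "11D"
    · subst h11D
      simp [stepA, (show convH "11D" = some "J♦" from by decide),
        (show PySem.List.pyGet? ['1', '1', 'D'] (-1) = some 'D' from by decide)]
    by_cases h12D : s = "12D"
    · subst h12D
      simp [stepA, (show convH "12D" = some "Q♦" from by decide),
        (show PySem.List.pyGet? ['1', '2', 'D'] (-1) = some 'D' from by decide)]
    by_cases h13D : s = "13D"
    · subst h13D
      simp [stepA, (show convH "13D" = some "K♦" from by decide),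
        (show PySem.List.pyGet? ['1', '3', 'D'] (-1) = some 'D' from by decide)]
    by_cases h1H : s = "1H"
    · subst h1H
      simp [stepA, (show convH "1H" = some "A♥" from by decide),
        (show PySem.List.pyGet? ['1', 'H'] (-1) = some 'H' from by decide)]
    by_cases h11H : s = "11H"
    · subst h11H
      simp [stepA, (show convH "11H" = some "J♥" from by decide),
        (show PySem.List.pyGet? ['1', '1', 'H'] (-1) = some 'H' from by decide)]
    by_cases h12H : s = "12H"
    · subst h12H
      simp [stepA, (show convH "12H" = some "Q♥" from by decide),
        (show PySem.List.pyGet? ['1', '2', 'H'] (-1) = some 'H' from by decide)]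
    by_cases h13H : s = "13H"
    · subst h13H
      simp [stepA, (show convH "13H" = some "K♥" from by decide),
        (show PySem.List.pyGet? ['1', '3', 'H'] (-1) = some 'H' from by decide)]
    -- generic card: dispatch on the suit character
    by_cases hC : c = 'C'
    · subst hC
      have r1 := rank_ne hl (t := "1") (u := "1C") (by decide) h1C
      have r11 := rank_ne hl (t := "11") (u := "11C") (by decide) h11C
      have r12 := rank_ne hl (t := "12") (u := "12C") (by decide) h12C
      have r13 := rank_ne hl (t := "13") (u := "13C") (by decide) h13C
      have hface : PySem.Dict.getD faceB (PySem.Str.slice s none (some (-1)))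
          (PySem.Str.slice s none (some (-1))) = PySem.Str.slice s none (some (-1)) := by
        rw [PySem.Dict.getD_eq_get?_getD,
          (show faceB = PySem.Dict.mk [("1","A"),("11","J"),("12","Q"),("13","K")] from by decide)]
        simp [Ne.symm r1, Ne.symm r11, Ne.symm r12, Ne.symm r13, PySem.Dict.get?]
      simp [stepA, convH, suitOf, rankOf, hget, h1C, h11C, h12C, h13C, h1S, h11S, h12S, h13S,
        h1D, h11D, h12D, h13D, h1H, h11H, h12H, h13H,
        (show PySem.Dict.get? suitsB 'C' = some "♣" from by decide), hface]
    by_cases hS : c = 'S'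
    · subst hS
      have r1 := rank_ne hl (t := "1") (u := "1S") (by decide) h1S
      have r11 := rank_ne hl (t := "11") (u := "11S") (by decide) h11S
      have r12 := rank_ne hl (t := "12") (u := "12S") (by decide) h12S
      have r13 := rank_ne hl (t := "13") (u := "13S") (by decide) h13S
      have hface : PySem.Dict.getD faceB (PySem.Str.slice s none (some (-1)))
          (PySem.Str.slice s none (some (-1))) = PySem.Str.slice s none (some (-1)) := by
        rw [PySem.Dict.getD_eq_get?_getD,
          (show faceB = PySem.Dict.mk [("1","A"),("11","J"),("12","Q"),("13","K")] from by decide)]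
        simp [Ne.symm r1, Ne.symm r11, Ne.symm r12, Ne.symm r13, PySem.Dict.get?]
      simp [stepA, convH, suitOf, rankOf, hget, h1C, h11C, h12C, h13C, h1S, h11S, h12S, h13S,
        h1D, h11D, h12D, h13D, h1H, h11H, h12H, h13H,
        (show PySem.Dict.get? suitsB 'S' = some "♠" from by decide), hface]
    by_cases hD : c = 'D'
    · subst hD
      have r1 := rank_ne hl (t := "1") (u := "1D") (by decide) h1D
      have r11 := rank_ne hl (t := "11") (u := "11D") (by decide) h11D
      have r12 := rank_ne hl (t := "12") (u := "12D") (by decide) h12D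
      have r13 := rank_ne hl (t := "13") (u := "13D") (by decide) h13D
      have hface : PySem.Dict.getD faceB (PySem.Str.slice s none (some (-1)))
          (PySem.Str.slice s none (some (-1))) = PySem.Str.slice s none (some (-1)) := by
        rw [PySem.Dict.getD_eq_get?_getD,
          (show faceB = PySem.Dict.mk [("1","A"),("11","J"),("12","Q"),("13","K")] from by decide)]
        simp [Ne.symm r1, Ne.symm r11, Ne.symm r12, Ne.symm r13, PySem.Dict.get?]
      simp [stepA, convH, suitOf, rankOf, hget, h1C, h11C, h12C, h13C, h1S, h11S, h12S, h13S,
        h1D, h11D, h12D, h13D, h1H, h11H, h12H, h13H,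
        (show PySem.Dict.get? suitsB 'D' = some "♦" from by decide), hface]
    by_cases hH : c = 'H'
    · subst hH
      have r1 := rank_ne hl (t := "1") (u := "1H") (by decide) h1H
      have r11 := rank_ne hl (t := "11") (u := "11H") (by decide) h11H
      have r12 := rank_ne hl (t := "12") (u := "12H") (by decide) h12H
      have r13 := rank_ne hl (t := "13") (u := "13H") (by decide) h13H
      have hface : PySem.Dict.getD faceB (PySem.Str.slice s none (some (-1)))
          (PySem.Str.slice s none (some (-1))) = PySem.Str.slice s none (some (-1)) := by
        rw [PySem.Dict.getD_eq_get?_getD,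
          (show faceB = PySem.Dict.mk [("1","A"),("11","J"),("12","Q"),("13","K")] from by decide)]
        simp [Ne.symm r1, Ne.symm r11, Ne.symm r12, Ne.symm r13, PySem.Dict.get?]
      simp [stepA, convH, suitOf, rankOf, hget, h1C, h11C, h12C, h13C, h1S, h11S, h12S, h13S,
        h1D, h11D, h12D, h13D, h1H, h11H, h12H, h13H,
        (show PySem.Dict.get? suitsB 'H' = some "♥" from by decide), hface]
    · simp [stepA, convH, suitOf, hget, h1C, h11C, h12C, h13C, h1S, h11S, h12S, h13S,
        h1D, h11D, h12D, h13D, h1H, h11H, h12H, h13H, hC, hS, hD, hH,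
        (show suitsB = PySem.Dict.mk [('C',"♣"),('S',"♠"),('D',"♦"),('H',"♥")] from by decide),
        PySem.Dict.get?_mk_cons, Ne.symm hC, Ne.symm hS, Ne.symm hD, Ne.symm hH,
        (show ∀ x : Char, (PySem.Dict.mk ([] : List (Char × String))).get? x = none from
          fun _ => rfl)]

lemma flat_len_le (xs : List String) :
    (xs.flatMap fun s => (convH s).toList).length ≤ xs.length := by
  induction xs with
  | nil => simp
  | cons s rest ih =>
    simp only [List.flatMap_cons, List.length_append, List.length_cons]
    have : ((convH s).toList).length ≤ 1 := by cases h : convH s <;> simp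
    omega

lemma foldl_stepA (xs : List String) (acc : List String) :
    xs.foldl stepA acc = acc ++ xs.flatMap fun s => (convH s).toList := by
  induction xs generalizing acc with
  | nil => simp
  | cons s rest ih => simp [ih, stepA_conv, List.append_assoc]

-- A's length-check form equals B's staged-passes form
lemma cond_eq_alt (xs : List String) :
    (if xs.length = (xs.flatMap fun s => (convH s).toList).length
     then some (xs.flatMap fun s => (convH s).toList) else none) = unicode_output_alt xs := by
  induction xs with
  | nil => simp [unicode_output_alt]
  | cons s rest ih =>
    cases h : suitOf s with
    | none =>
      have hc : convH s = none := by simp [convH, h]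
      have hle := flat_len_le rest
      simp only [unicode_output_alt, List.map_cons, List.mem_cons, hc,
        List.flatMap_cons, Option.toList_none, List.nil_append, List.length_cons]
      rw [if_neg (by omega), if_pos (Or.inl (by simp [h]))]
    | some u =>
      have hc : convH s = some (rankOf s ++ u) := by simp [convH, h]
      by_cases hmem : none ∈ rest.map suitOf
      · have halt : unicode_output_alt rest = none := by
          simp [unicode_output_alt, hmem]
        rw [halt] at ih
        have hcond : ¬ rest.length = (rest.flatMap fun s => (convH s).toList).length := by
          intro hcnd
          rw [if_pos hcnd] at ih
          simp at ih
        simp only [unicode_output_alt, List.map_cons, List.mem_cons, hc,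
          List.flatMap_cons, Option.toList_some, List.singleton_append, List.length_cons]
        rw [if_neg (by omega), if_pos (Or.inr hmem)]
      · have halt : unicode_output_alt rest
            = some (((rest.map rankOf).zip (rest.map suitOf)).map fun p => p.1 ++ p.2.getD "") := by
          simp [unicode_output_alt, hmem]
        rw [halt] at ih
        by_cases hcond : rest.length = (rest.flatMap fun s => (convH s).toList).length
        · rw [if_pos hcond] at ih
          have hflat := Option.some.inj ih
          simp only [unicode_output_alt, List.map_cons, List.mem_cons, hc,
            List.flatMap_cons, Option.toList_some, List.singleton_append, List.length_cons,
            List.zip_cons_cons]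
          rw [if_pos (by omega),
            if_neg (by simp [hmem, h])]
          simp [hflat, h]
        · rw [if_neg hcond] at ih
          simp at ih

-- ===== VERDICT =====
theorem unicode_output_spec : Claim_equal_unicode_output := by
  intro x _ _
  unfold Spec_unicode_output unicode_output
  rw [foldl_stepA, List.nil_append, cond_eq_alt]
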